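-- pv_equiv track=rewrite | github.com/OnlyBelter/movie_comment_classification | pre_processing.py | count_num_in_sent
-- ===== SOURCE A (Python) =====
-- def count_num_in_sent(sent_inx_list):
--     """
--
--     :param sent_inx_list:  [1685, 1477, 19, 775, 1391, 223, 686]
--     :return: index and number with ordered, {'inxs': [], 'num': []}
--     """
--     sent_inx_list = sorted(sent_inx_list)
--     inx2count = {}
--     inxs = []
--     num = []
--     for inx in sent_inx_list:
--         if inx in inx2count:
--             inx2count[inx] += 1
--         else:
--             inx2count[inx] = 1
--     for inx in sorted(inx2count.keys()):
--         inxs.append(inx)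
--         num.append(inx2count[inx])
--     return {'inxs': inxs, 'num': num}
-- ===== SOURCE B (Python) =====
-- def count_num_in_sent(sent_inx_list):
--     """Single run-length pass over the sorted list: no counting dict, no second key-sort."""
--     inxs = []
--     num = []
--     for v in sorted(sent_inx_list):
--         if inxs and inxs[-1] == v:
--             num[-1] += 1
--         else:
--             inxs.append(v)
--             num.append(1)
--     return {'inxs': inxs, 'num': num}
-- ===== Notes on version B (the rewrite author's own statement) =====
-- stated objective: simpler
-- what changed: Replaced count-into-dict-then-sort-the-keys with a single run-length pass over the sorted list that appends a new index or bumps the last count, dropping the intermediate dict and the second sort.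
import Mathlib
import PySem

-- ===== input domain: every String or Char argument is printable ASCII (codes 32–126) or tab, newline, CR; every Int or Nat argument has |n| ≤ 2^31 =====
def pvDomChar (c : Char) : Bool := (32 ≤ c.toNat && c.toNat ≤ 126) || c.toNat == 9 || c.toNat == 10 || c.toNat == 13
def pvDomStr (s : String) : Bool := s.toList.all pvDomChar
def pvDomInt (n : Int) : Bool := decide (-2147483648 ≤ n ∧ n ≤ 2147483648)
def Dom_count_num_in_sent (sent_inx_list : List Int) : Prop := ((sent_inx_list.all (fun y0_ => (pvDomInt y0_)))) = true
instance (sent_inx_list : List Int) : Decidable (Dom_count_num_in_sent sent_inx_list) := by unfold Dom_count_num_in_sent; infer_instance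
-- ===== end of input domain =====

-- B replaces A's count-into-dict-then-sort-keys with one run-length pass over the sorted
-- list (objective: simpler); same return value, no mutation of the argument.

-- ===== PORT A =====
def count_num_in_sent (sent_inx_list : List Int) : List (String × List Int) :=
  -- sent_inx_list = sorted(sent_inx_list)
  let s := PySem.List.sorted sent_inx_list (fun x => x) false
  -- for inx in sent_inx_list: if inx in inx2count: inx2count[inx] += 1 else: inx2count[inx] = 1
  let inx2count : PySem.Dict Int Int :=
    s.foldl (fun d inx =>
        if d.contains inx then d.insert inx (d.getD inx 0 + 1) else d.insert inx 1)
      PySem.Dict.empty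
  -- for inx in sorted(inx2count.keys()): inxs.append(inx); num.append(inx2count[inx])
  -- (inx2count[inx]: the key is always present here, so getD never takes its default)
  let p := (PySem.List.sorted inx2count.keys (fun x => x) false).foldl
      (fun (p : List Int × List Int) inx => (p.1 ++ [inx], p.2 ++ [inx2count.getD inx 0]))
      ([], [])
  [("inxs", p.1), ("num", p.2)]

-- ===== PORT B =====
-- num[-1] += 1
def pvBumpLast (l : List Int) : List Int := l.dropLast ++ [l.getLast?.getD 0 + 1]

def count_num_in_sent_alt (sent_inx_list : List Int) : List (String × List Int) :=
  -- for v in sorted(...): if inxs and inxs[-1] == v: num[-1] += 1 else: append v / append 1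
  let p := (PySem.List.sorted sent_inx_list (fun x => x) false).foldl
      (fun (p : List Int × List Int) v =>
        if p.1.getLast? == some v then (p.1, pvBumpLast p.2) else (p.1 ++ [v], p.2 ++ [1]))
      ([], [])
  [("inxs", p.1), ("num", p.2)]

-- ===== PRECONDITION & SPEC =====
def Spec_count_num_in_sent (sent_inx_list : List Int) (out : List (String × List Int)) : Prop := out = count_num_in_sent_alt sent_inx_list
instance (sent_inx_list : List Int) (out : List (String × List Int)) : Decidable (Spec_count_num_in_sent sent_inx_list out) := by unfold Spec_count_num_in_sent; infer_instance

-- ===== CLAIM (what is proved, stated in full; the proofs are below) =====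
def Claim_equal_count_num_in_sent : Prop := ∀ (sent_inx_list : List Int), Dom_count_num_in_sent sent_inx_list → Spec_count_num_in_sent sent_inx_list (count_num_in_sent sent_inx_list)

-- ===== LEMMAS AND PROOFS =====

-- the two append-accumulators of A's output loop, computed in closed form
theorem pvFoldlPairApp (l a b : List Int) (g : Int → Int) :
    l.foldl (fun (p : List Int × List Int) x => (p.1 ++ [x], p.2 ++ [g x])) (a, b)
      = (a ++ l, b ++ l.map g) := by
  induction l generalizing a b with
  | nil => simp
  | cons x t ih => simp [List.foldl_cons, ih]

-- A's counting loop body is the Counter step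
theorem pvStepA_eq :
    (fun (d : PySem.Dict Int Int) inx =>
        if d.contains inx then d.insert inx (d.getD inx 0 + 1) else d.insert inx 1)
      = (fun (d : PySem.Dict Int Int) x => d.insert x (d.getD x 0 + 1)) := by
  funext d x
  by_cases h : d.contains x
  · simp [h]
  · have h0 : d.contains x = false := by simpa using h
    rw [if_neg (by simp [h0]), PySem.Dict.getD_of_not_contains d 0 h0]
    norm_num

theorem pvOfList_sublist (xs : List Int) : (PySem.Set.ofList xs).Sublist xs := by
  induction xs with
  | nil => simp [PySem.Set.ofList]
  | cons x t ih =>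
    rw [PySem.Set.ofList_cons]
    have hd : List.Sublist ((PySem.Set.ofList t).discard x) (PySem.Set.ofList t) :=
      List.filter_sublist
    exact List.Sublist.cons₂ x (hd.trans ih)

theorem pvPairwise_ofList {xs : List Int} (h : xs.Pairwise (· ≤ ·)) :
    (PySem.Set.ofList xs).Pairwise (· ≤ ·) :=
  h.sublist (pvOfList_sublist xs)

-- in a nodup, ≤-sorted list, an upper-bound member is the last element
theorem pvGetLast (L : List Int) (v : Int) (hnd : L.Nodup) (hp : L.Pairwise (· ≤ ·))
    (hv : v ∈ L) (hub : ∀ y ∈ L, y ≤ v) : L.getLast? = some v := by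
  induction L with
  | nil => cases hv
  | cons a t ih =>
    cases t with
    | nil => simp at hv ⊢; simp [hv]
    | cons b u =>
      have hstep : (a :: b :: u).getLast? = (b :: u).getLast? := by simp
      rw [hstep]
      rcases List.mem_cons.mp hv with h1 | h2
      · -- v = a: impossible unless b :: u has an element equal to a, contradicting nodup
        exfalso
        have hab : a ≤ b := (List.pairwise_cons.mp hp).1 b (by simp)
        have hbv : b ≤ v := hub b (by simp)
        have : b = a := le_antisymm (h1 ▸ hbv) hab
        exact (List.nodup_cons.mp hnd).1 (by simp [this])
      · exact ih (List.nodup_cons.mp hnd).2 (List.pairwise_cons.mp hp).2 h2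
          (fun y hy => hub y (List.mem_cons_of_mem a hy))

-- B's run-length loop in closed form, on a sorted input
theorem pvBLoop (s : List Int) (h : s.Pairwise (· ≤ ·)) :
    s.foldl (fun (p : List Int × List Int) v =>
        if p.1.getLast? == some v then (p.1, pvBumpLast p.2) else (p.1 ++ [v], p.2 ++ [1]))
      ([], [])
      = (PySem.Set.ofList s, (PySem.Set.ofList s).map (fun k => (s.count k : Int))) := by
  induction s using List.reverseRecOn with
  | nil => simp [PySem.Set.ofList]
  | append_singleton t v ih =>
    have hpa := List.pairwise_append.mp h
    have hp : t.Pairwise (· ≤ ·) := hpa.1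
    have hub : ∀ y ∈ t, y ≤ v := fun y hy => hpa.2.2 y hy v (by simp)
    have hubL : ∀ y ∈ PySem.Set.ofList t, y ≤ v :=
      fun y hy => hub y ((PySem.Set.mem_ofList _ _).mp hy)
    have hnd : (PySem.Set.ofList t).Nodup := PySem.Set.nodup_ofList t
    rw [List.foldl_append, ih hp]
    simp only [List.foldl_cons, List.foldl_nil]
    by_cases hv : v ∈ t
    · -- run continues: v equals the last emitted index
      have hvL : v ∈ PySem.Set.ofList t := (PySem.Set.mem_ofList _ _).mpr hv
      have hlast : (PySem.Set.ofList t).getLast? = some v :=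
        pvGetLast _ v hnd (pvPairwise_ofList hp) hvL hubL
      obtain ⟨D, hD⟩ := List.getLast?_eq_some_iff.mp hlast
      have hvD : v ∉ D := by
        intro hc
        have h3 := (List.nodup_append.mp (hD ▸ hnd)).2.2
        exact h3 v hc v (by simp) rfl
      have hset : PySem.Set.ofList (t ++ [v]) = PySem.Set.ofList t := by
        rw [PySem.Set.ofList_append_singleton, PySem.Set.add_of_mem hvL]
      rw [if_pos (by simp [hlast]), hset]
      refine Prod.ext rfl ?_
      rw [hD]
      simp only [List.map_append, List.map_cons, List.map_nil, pvBumpLast,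
        List.dropLast_concat, List.getLast?_concat, Option.getD_some]
      congr 1
      · exact List.map_congr_left (fun k hk => by
          have hkv : k ≠ v := fun he => hvD (he ▸ hk)
          simp [List.count_append, List.count_eq_zero, hkv])
      · simp [List.count_append]
    · -- new run: v differs from the last emitted index
      have hvL : v ∉ PySem.Set.ofList t := fun hc => hv ((PySem.Set.mem_ofList _ _).mp hc)
      have hne : ((PySem.Set.ofList t).getLast? == some v) = false := by
        rcases he : (PySem.Set.ofList t).getLast? with _ | w
        · simp
        · have hw : w ∈ PySem.Set.ofList t := List.mem_of_getLast? he
          have : w ≠ v := fun hc => hvL (hc ▸ hw)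
          simp [this]
      have hset : PySem.Set.ofList (t ++ [v]) = PySem.Set.ofList t ++ [v] := by
        rw [PySem.Set.ofList_append_singleton, PySem.Set.add_of_not_mem hvL]
      rw [hne, if_neg (by simp), hset]
      refine Prod.ext rfl ?_
      simp only [List.map_append, List.map_cons, List.map_nil]
      congr 1
      · exact List.map_congr_left (fun k hk => by
          have hkv : k ≠ v := fun he => hvL (he ▸ hk)
          simp [List.count_append, List.count_eq_zero, hkv])
      · simp [List.count_append, List.count_eq_zero_of_not_mem hv]

-- ===== VERDICT (by name: the statement is the Claim_ definition above) =====
theorem count_num_in_sent_spec : Claim_equal_count_num_in_sent := by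
  intro xs _
  unfold Spec_count_num_in_sent count_num_in_sent count_num_in_sent_alt
  dsimp only
  have hsp : (PySem.List.sorted xs (fun x => x)).Pairwise (· ≤ ·) := by
    simpa using PySem.List.sorted_pairwise xs (fun x => x)
  have hset : (PySem.Set.ofList (PySem.List.sorted xs (fun x => x))).Pairwise
      (fun a b => (fun x => x) a ≤ (fun x => x) b) := by
    simpa using pvPairwise_ofList hsp
  rw [pvStepA_eq, PySem.Dict.foldl_insert_getD_add_one_eq_counter, PySem.Dict.keys_counter,
    PySem.List.sorted_eq_self_of_pairwise _ _ hset, pvFoldlPairApp, pvBLoop _ hsp]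
  simp [PySem.Dict.getD_counter]
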